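-- pv_equiv track=rewrite | github.com/TaoziLake/analyzer | agents/template_agent.py | _qualname_suffix_after_module
-- ===== SOURCE A (Python) =====
-- from typing import Dict, Iterable, List, Optional, Sequence, Tuple
--
-- def _posix(path: str) -> str:
--     return path.replace("\\", "/")
--
-- def _qualname_suffix_after_module(qualname: str, rel_file_path: str, ext: str = ".py") -> List[str]:
--     """
--     Given qualname and resolved rel_file_path, return the nested name stack after module.
--     Example:
--       rel_file_path = unidiff/patch.py => module_qual = unidiff.patch
--       qualname = unidiff.patch.PatchSet._parse => suffix = [PatchSet, _parse]
--     """
--     rel = _posix(rel_file_path)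
--     if rel.endswith(ext):
--         rel = rel[: -len(ext)]
--     module_qual = rel.replace("/", ".")
--     if module_qual.endswith(".__init__"):
--         module_qual = module_qual[: -len(".__init__")]
--     if qualname == module_qual:
--         return []
--     if qualname.startswith(module_qual + "."):
--         tail = qualname[len(module_qual) + 1 :]
--         return [p for p in tail.split(".") if p]
--     # fallback: try from the front by removing common prefix
--     qparts = [p for p in qualname.split(".") if p]
--     mparts = [p for p in module_qual.split(".") if p]
--     k = 0
--     while k < min(len(qparts), len(mparts)) and qparts[k] == mparts[k]:
--         k += 1
--     return qparts[k:]
-- ===== SOURCE B (Python) =====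
-- from typing import List
--
--
-- def _posix(path: str) -> str:
--     return path.replace("\\", "/")
--
--
-- def _module_qual(rel_file_path: str, ext: str) -> str:
--     rel = _posix(rel_file_path)
--     if rel.endswith(ext):
--         rel = rel[: -len(ext)]
--     mq = rel.replace("/", ".")
--     if mq.endswith(".__init__"):
--         mq = mq[: -len(".__init__")]
--     return mq
--
--
-- def _qualname_suffix_after_module(qualname: str, rel_file_path: str, ext: str = ".py") -> List[str]:
--     """Consume the two dotted strings segment by segment with str.partition
--     (no part lists, no index arithmetic, no string-prefix special cases):
--     matched leading segments are discarded, then the remaining segments of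
--     qualname are collected directly."""
--     q, m = qualname, _module_qual(rel_file_path, ext)
--     while True:
--         qh, qsep, qt = q.partition(".")
--         if not qh:
--             if not qsep:
--                 return []
--             q = qt
--             continue
--         mh, msep, mt = m.partition(".")
--         if not mh:
--             if not msep:
--                 break
--             m = mt
--             continue
--         if qh != mh:
--             break
--         q, m = qt, mt
--     out = []
--     while q:
--         h, _, q = q.partition(".")
--         if h:
--             out.append(h)
--     return out
-- ===== Notes on version B (the rewrite author's own statement) =====
-- stated objective: alternative
-- what changed: Instead of A's three branches (string equality, startswith with character slicing, and an indexed walk over precomputed part lists), B never builds part lists: it consumes the two dotted strings segment by segment with str.partition, discarding matched leading segments, then collects the remaining segments of qualname directly.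
import Mathlib
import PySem

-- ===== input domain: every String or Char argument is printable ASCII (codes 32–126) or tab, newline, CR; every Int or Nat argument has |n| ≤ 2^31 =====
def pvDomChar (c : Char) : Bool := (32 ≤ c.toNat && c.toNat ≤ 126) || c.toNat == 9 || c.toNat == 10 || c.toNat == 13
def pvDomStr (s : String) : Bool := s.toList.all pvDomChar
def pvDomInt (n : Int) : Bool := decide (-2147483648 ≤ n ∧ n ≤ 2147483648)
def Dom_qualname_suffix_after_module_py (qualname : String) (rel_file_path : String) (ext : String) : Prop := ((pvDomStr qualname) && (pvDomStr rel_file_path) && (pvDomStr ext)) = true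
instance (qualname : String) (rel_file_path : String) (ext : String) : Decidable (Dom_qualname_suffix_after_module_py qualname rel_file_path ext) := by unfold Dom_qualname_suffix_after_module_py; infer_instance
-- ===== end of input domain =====

-- B drops A's part lists, startswith test and index walk and instead consumes the two
-- dotted strings segment by segment with partition (objective: alternative, same cost);
-- the return values are proved equal on all inputs.

-- ===== PORT A =====
-- A's `while k < min(...) and qparts[k] == mparts[k]: k += 1` loop; `qparts[k]` with
-- k < min(len qp, len mp) is in range, so List.getD is exact for the Python indexing here.
def aWhile (qp mp : List String) (k : Nat) : Nat :=
  if _h : k < min qp.length mp.length then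
    if qp.getD k "" = mp.getD k "" then aWhile qp mp (k + 1) else k
  else k
termination_by min qp.length mp.length - k
decreasing_by omega

-- literal transliteration of A, on the List Char side (PySem.Chars = Python str semantics)
def qualname_suffix_after_module_py (qualname : String) (rel_file_path : String) (ext : String) : List String :=
  let rel0 := PySem.Chars.replace rel_file_path.toList ['\\'] ['/']      -- _posix
  let rel := if PySem.Chars.endswith rel0 ext.toList then
               PySem.Chars.slice rel0 none (some (-(PySem.Chars.len ext.toList))) else rel0
  let mq0 := PySem.Chars.replace rel ['/'] ['.']
  let mq := if PySem.Chars.endswith mq0 ".__init__".toList then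
              PySem.Chars.slice mq0 none (some (-(PySem.Chars.len ".__init__".toList))) else mq0
  if qualname.toList = mq then []
  else if PySem.Chars.startswith qualname.toList (mq ++ ['.']) then
    let tail := PySem.Chars.slice qualname.toList (some (PySem.Chars.len mq + 1)) none
    ((PySem.Chars.splitOn tail ['.']).filter (fun p => p ≠ [])).map String.ofList
  else
    let qparts := ((PySem.Chars.splitOn qualname.toList ['.']).filter (fun p => p ≠ [])).map String.ofList
    let mparts := ((PySem.Chars.splitOn mq ['.']).filter (fun p => p ≠ [])).map String.ofList
    PySem.List.slice qparts (some ((aWhile qparts mparts 0 : Nat) : Int)) none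

-- ===== PORT B =====
-- Source B's _module_qual helper (same normalization as A, by design)
def bModuleQual (rel_file_path : String) (ext : String) : List Char :=
  let rel0 := PySem.Chars.replace rel_file_path.toList ['\\'] ['/']
  let rel := if PySem.Chars.endswith rel0 ext.toList then
               PySem.Chars.slice rel0 none (some (-(PySem.Chars.len ext.toList))) else rel0
  let mq0 := PySem.Chars.replace rel ['/'] ['.']
  if PySem.Chars.endswith mq0 ".__init__".toList then
    PySem.Chars.slice mq0 none (some (-(PySem.Chars.len ".__init__".toList))) else mq0

-- Source B's `s.partition(".")` : (head before first '.', sep found?, tail after it)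
def bPartition : List Char → List Char × Bool × List Char
  | [] => ([], false, [])
  | c :: rest =>
    if c = '.' then ([], true, rest)
    else ((c :: (bPartition rest).1, (bPartition rest).2.1, (bPartition rest).2.2))

-- partition accounts for every character (cited by the termination proofs of B's loops)
theorem bPartition_len (cs : List Char) :
    (bPartition cs).1.length + (if (bPartition cs).2.1 then 1 else 0) + (bPartition cs).2.2.length
      = cs.length := by
  induction cs with
  | nil => simp [bPartition]
  | cons c rest ih =>
    by_cases h : c = '.'
    · simp [bPartition, h]; omega
    · simp only [bPartition, if_neg h, List.length_cons]
      cases hb : (bPartition rest).2.1 <;> simp [hb] at ih ⊢ <;> omega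

-- a nonempty string yields a nonempty head or a separator (cited by the termination proofs)
theorem bPartition_progress (c : Char) (rest : List Char) :
    (bPartition (c :: rest)).1 ≠ [] ∨ (bPartition (c :: rest)).2.1 = true := by
  by_cases h : c = '.' <;> simp [bPartition, h]

-- Source B's trailing `while q:` collection loop, with the Python list as accumulator
def bCollect (q : List Char) (out : List String) : List String :=
  if q = [] then out.reverse
  else bCollect (bPartition q).2.2
        (if (bPartition q).1 ≠ [] then String.ofList (bPartition q).1 :: out else out)
termination_by q.length
decreasing_by
  rename_i h
  rcases q with _ | ⟨c, rest⟩
  · exact absurd rfl h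
  · have hl := bPartition_len (c :: rest)
    rcases bPartition_progress c rest with hp | hp
    · have : 1 ≤ (bPartition (c :: rest)).1.length := List.length_pos_of_ne_nil hp
      split_ifs at hl <;> simp at hl ⊢ <;> omega
    · rw [hp] at hl; simp at hl ⊢; omega

-- Source B's main `while True:` loop (tail-recursive transliteration; `break` runs the collector)
def bLoop (q m : List Char) : List String :=
  if (bPartition q).1 = [] then
    if (bPartition q).2.1 then bLoop (bPartition q).2.2 m else []
  else if (bPartition m).1 = [] then
    if (bPartition m).2.1 then bLoop q (bPartition m).2.2 else bCollect q []
  else if (bPartition q).1 = (bPartition m).1 then bLoop (bPartition q).2.2 (bPartition m).2.2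
  else bCollect q []
termination_by q.length + m.length
decreasing_by
  · rcases q with _ | ⟨c, rest⟩
    · simp [bPartition] at *
    · have hl := bPartition_len (c :: rest); split_ifs at hl <;> simp at hl ⊢ <;> omega
  · rcases m with _ | ⟨c, rest⟩
    · simp [bPartition] at *
    · have hl := bPartition_len (c :: rest); split_ifs at hl <;> simp at hl ⊢ <;> omega
  · have hlq := bPartition_len q
    have hlm := bPartition_len m
    have h1 : 1 ≤ (bPartition q).1.length := List.length_pos_of_ne_nil (by assumption)
    split_ifs at hlq hlm <;> omega

-- literal transliteration of Source B's entry point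
def qualname_suffix_after_module_py_alt (qualname : String) (rel_file_path : String) (ext : String) : List String :=
  bLoop qualname.toList (bModuleQual rel_file_path ext)

-- ===== PRECONDITION & SPEC =====
def Spec_qualname_suffix_after_module_py (qualname : String) (rel_file_path : String) (ext : String) (out : List String) : Prop := out = qualname_suffix_after_module_py_alt qualname rel_file_path ext
instance (qualname : String) (rel_file_path : String) (ext : String) (out : List String) : Decidable (Spec_qualname_suffix_after_module_py qualname rel_file_path ext out) := by unfold Spec_qualname_suffix_after_module_py; infer_instance

-- ===== CLAIM (what is proved, stated in full; the proofs are below) =====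
def Claim_equal_qualname_suffix_after_module_py : Prop := ∀ (qualname : String) (rel_file_path : String) (ext : String), Dom_qualname_suffix_after_module_py qualname rel_file_path ext → Spec_qualname_suffix_after_module_py qualname rel_file_path ext (qualname_suffix_after_module_py qualname rel_file_path ext)

-- ===== LEMMAS AND PROOFS =====

-- structural characterisation of single-char split
def splitDot : List Char → List (List Char)
  | [] => [[]]
  | c :: rest =>
    match splitDot rest with
    | p :: ps => if c = '.' then [] :: p :: ps else (c :: p) :: ps
    | [] => []

theorem splitDot_ne_nil (cs : List Char) : splitDot cs ≠ [] := by
  induction cs with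
  | nil => simp [splitDot]
  | cons c rest ih =>
    cases h : splitDot rest with
    | nil => exact absurd h ih
    | cons p ps => simp [splitDot, h]; split_ifs <;> simp

theorem splitOn_go_dot (cs : List Char) : ∀ (fuel : Nat) (cur : List Char) (acc : List (List Char)),
    cs.length ≤ fuel →
    PySem.Chars.splitOn.go ['.'] fuel cs cur acc =
      acc.reverse ++ (match splitDot cs with
                      | p :: ps => (cur.reverse ++ p) :: ps
                      | [] => []) := by
  induction cs with
  | nil =>
    intro fuel cur acc _
    cases fuel <;> simp [PySem.Chars.splitOn.go, splitDot]
  | cons c rest ih =>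
    intro fuel cur acc hf
    cases fuel with
    | zero => simp at hf
    | succ f =>
      have hr : rest.length ≤ f := by simpa using hf
      by_cases hc : c = '.'
      · subst hc
        rw [PySem.Chars.splitOn.go]
        rw [if_pos (by simp [List.isPrefixOf])]
        simp only [List.length_cons, List.length_nil, List.drop_succ_cons, List.drop_zero]
        rw [ih f [] (cur.reverse :: acc) hr]
        cases h : splitDot rest with
        | nil => exact absurd h (splitDot_ne_nil rest)
        | cons p ps => simp [splitDot, h]
      · rw [PySem.Chars.splitOn.go]
        rw [if_neg (by simp [List.isPrefixOf]; exact fun h => absurd h.symm hc)]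
        rw [ih f (c :: cur) acc hr]
        cases h : splitDot rest with
        | nil => exact absurd h (splitDot_ne_nil rest)
        | cons p ps => simp [splitDot, h, hc]

theorem splitOn_dot (cs : List Char) : PySem.Chars.splitOn cs ['.'] = splitDot cs := by
  have h := splitOn_go_dot cs (cs.length + 1) [] [] (by omega)
  rw [PySem.Chars.splitOn, h]
  cases hs : splitDot cs with
  | nil => exact absurd hs (splitDot_ne_nil cs)
  | cons p ps => simp

theorem splitDot_append (a b : List Char) : splitDot (a ++ '.' :: b) = splitDot a ++ splitDot b := by
  induction a with
  | nil =>
    cases h : splitDot b with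
    | nil => exact absurd h (splitDot_ne_nil b)
    | cons p ps => simp [splitDot, h]
  | cons c a' ih =>
    cases h' : splitDot a' with
    | nil => exact absurd h' (splitDot_ne_nil a')
    | cons p' ps' =>
      cases h : splitDot (a' ++ '.' :: b) with
      | nil => exact absurd h (splitDot_ne_nil _)
      | cons p ps =>
        rw [h, h'] at ih
        simp only [List.cons_append] at ih
        injection ih with hp hps
        simp only [List.cons_append, splitDot, h, h']
        split_ifs with hc <;> simp [hp, hps]

-- the filtered dotted part list appearing in A (proof-side abbreviation)
def bParts (cs : List Char) : List String :=
  ((PySem.Chars.splitOn cs ['.']).filter (fun p => p ≠ [])).map String.ofList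

theorem bParts_append (a b : List Char) : bParts (a ++ '.' :: b) = bParts a ++ bParts b := by
  simp [bParts, splitOn_dot, splitDot_append, List.filter_append]

-- tail of partition is empty when no separator was found
theorem bPartition_tail_of_not_sep (q : List Char) (h : (bPartition q).2.1 = false) :
    (bPartition q).2.2 = [] := by
  induction q with
  | nil => simp [bPartition]
  | cons c rest ih =>
    by_cases hc : c = '.' <;> simp [bPartition, hc] at h ⊢
    exact ih h

theorem bParts_nil : bParts [] = [] := by
  simp [bParts, splitOn_dot, splitDot]

-- splitDot through the lens of bPartition
theorem splitDot_partition (cs : List Char) :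
    splitDot cs = if (bPartition cs).2.1
                  then (bPartition cs).1 :: splitDot (bPartition cs).2.2
                  else [(bPartition cs).1] := by
  induction cs with
  | nil => simp [splitDot, bPartition]
  | cons c rest ih =>
    by_cases h : c = '.'
    · subst h
      cases hs : splitDot rest with
      | nil => exact absurd hs (splitDot_ne_nil rest)
      | cons p ps => simp [splitDot, bPartition, hs]
    · cases hb : (bPartition rest).2.1 <;> rw [hb] at ih <;>
        · simp only [splitDot, ih]
          simp [bPartition, h, hb]

-- bParts decomposed the way B's loops see the string
theorem bParts_partition (cs : List Char) :
    bParts cs = (if (bPartition cs).1 ≠ [] then [String.ofList (bPartition cs).1] else [])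
                ++ (if (bPartition cs).2.1 then bParts (bPartition cs).2.2 else []) := by
  unfold bParts
  rw [splitOn_dot, splitOn_dot, splitDot_partition cs]
  split_ifs with hsep hh hh <;> simp_all [List.filter]

theorem ofList_inj {a b : List Char} (h : String.ofList a = String.ofList b) : a = b := by
  have := congrArg String.toList h
  simpa using this

-- B's collection loop produces bParts
theorem bCollect_eq (q : List Char) (out : List String) :
    bCollect q out = out.reverse ++ bParts q := by
  induction q, out using bCollect.induct with
  | case1 out => rw [bCollect]; simp [bParts_nil]
  | case2 q out h ih =>
    simp only [dite_eq_ite] at ih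
    rw [bCollect, if_neg h, ih, bParts_partition q]
    by_cases hs : (bPartition q).2.1
    · split_ifs <;> simp_all
    · have ht := bPartition_tail_of_not_sep q (by simpa using hs)
      rw [ht]
      split_ifs <;> simp_all [bParts_nil]

-- the common reference function: strip the common prefix of the two part lists
def tailAfter : List String → List String → List String
  | q :: qs, m :: ms => if q = m then tailAfter qs ms else q :: qs
  | qs, _ => qs

theorem tailAfter_nil_right (qs : List String) : tailAfter qs [] = qs := by
  cases qs <;> rfl

theorem tailAfter_append (xs ys : List String) : tailAfter (xs ++ ys) xs = ys := by
  induction xs with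
  | nil => simpa using tailAfter_nil_right ys
  | cons x xs ih => simpa [tailAfter] using ih

theorem tailAfter_self (xs : List String) : tailAfter xs xs = [] := by
  simpa using tailAfter_append xs []

-- B's main loop IS tailAfter of the part lists
theorem bLoop_eq (q m : List Char) : bLoop q m = tailAfter (bParts q) (bParts m) := by
  induction q, m using bLoop.induct with
  | case1 q m hh hsep ih =>
    rw [bLoop, if_pos hh, if_pos hsep, ih, bParts_partition q]
    simp [hh, hsep]
  | case2 q m hh hsep =>
    rw [bLoop, if_pos hh, if_neg hsep]
    have : bParts q = [] := by
      rw [bParts_partition q]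
      have ht := bPartition_tail_of_not_sep q (by simpa using hsep)
      simp [hh, hsep]
    rw [this]; simp [tailAfter]
  | case3 q m hh hmh hmsep ih =>
    rw [bLoop, if_neg hh, if_pos hmh, if_pos hmsep, ih, bParts_partition m]
    simp [hmh, hmsep]
  | case4 q m hh hmh hmsep =>
    rw [bLoop, if_neg hh, if_pos hmh, if_neg hmsep]
    have : bParts m = [] := by
      rw [bParts_partition m]
      have ht := bPartition_tail_of_not_sep m (by simpa using hmsep)
      simp [hmh, hmsep]
    rw [this, tailAfter_nil_right]
    simpa using bCollect_eq q []
  | case5 q m hh hmh heq ih =>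
    rw [bLoop, if_neg hh, if_neg hmh, if_pos heq, ih,
        bParts_partition q, bParts_partition m]
    by_cases hsq : (bPartition q).2.1 <;> by_cases hsm : (bPartition m).2.1 <;>
      · have htq := fun h => bPartition_tail_of_not_sep q h
        have htm := fun h => bPartition_tail_of_not_sep m h
        simp_all [tailAfter, bParts_nil]
  | case6 q m hh hmh hne =>
    rw [bLoop, if_neg hh, if_neg hmh, if_neg hne,
        bParts_partition q, bParts_partition m]
    have hne' : String.ofList (bPartition q).1 ≠ String.ofList (bPartition m).1 :=
      fun h => hne (ofList_inj h)
    rw [bCollect_eq q [], bParts_partition q]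
    simp only [List.reverse_nil, List.nil_append]
    simp [hh, hmh, tailAfter, hne']

-- A's while loop shifted by one
theorem aWhile_succ (q m : String) : ∀ (n : Nat) (qs ms : List String) (k : Nat),
    min qs.length ms.length ≤ k + n →
    aWhile (q :: qs) (m :: ms) (k + 1) = aWhile qs ms k + 1 := by
  intro n
  induction n with
  | zero =>
    intro qs ms k h
    have hA : ¬ (k + 1 < min (q :: qs).length (m :: ms).length) := by simp; omega
    have hB : ¬ (k < min qs.length ms.length) := by omega
    conv_lhs => rw [aWhile]
    rw [dif_neg hA]
    conv_rhs => rw [aWhile]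
    rw [dif_neg hB]
  | succ n ih =>
    intro qs ms k h
    by_cases hk : k < min qs.length ms.length
    · have hA : k + 1 < min (q :: qs).length (m :: ms).length := by simp; omega
      conv_lhs => rw [aWhile]
      rw [dif_pos hA]
      conv_rhs => rw [aWhile]
      rw [dif_pos hk]
      simp only [List.getD_cons_succ]
      split_ifs with he
      · exact ih qs ms (k + 1) (by omega)
      · rfl
    · have hA : ¬ (k + 1 < min (q :: qs).length (m :: ms).length) := by simp; omega
      conv_lhs => rw [aWhile]
      rw [dif_neg hA]
      conv_rhs => rw [aWhile]
      rw [dif_neg hk]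

-- A's fallback computation IS tailAfter
theorem aWhile_drop (qp : List String) : ∀ mp : List String,
    qp.drop (aWhile qp mp 0) = tailAfter qp mp := by
  induction qp with
  | nil => intro mp; rw [aWhile]; simp [tailAfter]
  | cons q qs ih =>
    intro mp
    cases mp with
    | nil => rw [aWhile]; simp [tailAfter_nil_right]
    | cons m ms =>
      conv_lhs => rw [aWhile]
      rw [dif_pos (by simp)]
      simp only [List.getD_cons_zero]
      split_ifs with he
      · rw [aWhile_succ q m (min qs.length ms.length) qs ms 0 (by omega)]
        simp only [List.drop_succ_cons]
        simpa [tailAfter, he] using ih ms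
      · simp [tailAfter, he]

theorem slice_from_nat {α : Type} (xs : List α) (k : Nat) :
    PySem.List.slice xs (some (k : Int)) none = xs.drop k := by
  rw [PySem.List.slice_from xs (by positivity)]
  simp

-- A's branch structure, for an arbitrary normalized module path M, equals tailAfter
theorem core (q M : List Char) :
    (if q = M then ([] : List String)
     else if PySem.Chars.startswith q (M ++ ['.']) then
       ((PySem.Chars.splitOn (PySem.Chars.slice q (some (PySem.Chars.len M + 1)) none) ['.']).filter
         (fun p => p ≠ [])).map String.ofList
     else
       PySem.List.slice (bParts q) (some ((aWhile (bParts q) (bParts M) 0 : Nat) : Int)) none)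
    = tailAfter (bParts q) (bParts M) := by
  split_ifs with h1 h2
  · subst h1
    exact (tailAfter_self _).symm
  · obtain ⟨t, ht⟩ := (PySem.Chars.startswith_iff _ _).1 h2
    have hq : q = M ++ '.' :: t := by rw [← ht]; simp
    have hlen : PySem.Chars.slice q (some (PySem.Chars.len M + 1)) none = t := by
      have hcast : PySem.Chars.len M + 1 = ((M.length + 1 : Nat) : Int) := by
        simp [PySem.Chars.len_eq]
      rw [hcast, PySem.Chars.slice_eq_listSlice, slice_from_nat, hq]
      rw [show M ++ '.' :: t = (M ++ ['.']) ++ t from by simp,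
          show M.length + 1 = (M ++ ['.']).length from by simp]
      exact List.drop_left
    rw [hlen]
    have : bParts q = bParts M ++ bParts t := by rw [hq, bParts_append]
    rw [this, tailAfter_append]
    rfl
  · rw [slice_from_nat]
    exact aWhile_drop _ _

-- main equivalence
theorem main_eq (qualname rel_file_path ext : String) :
    qualname_suffix_after_module_py qualname rel_file_path ext =
      qualname_suffix_after_module_py_alt qualname rel_file_path ext := by
  rw [qualname_suffix_after_module_py_alt, bLoop_eq]
  exact core qualname.toList (bModuleQual rel_file_path ext)

-- ===== VERDICT (by name: the statement is the Claim_ definition above) =====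
theorem qualname_suffix_after_module_py_spec : Claim_equal_qualname_suffix_after_module_py := by
  intro qualname rel_file_path ext _
  exact main_eq qualname rel_file_path ext
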